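-- pv_equiv track=rewrite | github.com/und3rr00t/A-Maz-Ing | turt/am.py | get_path_coords
-- ===== SOURCE A (Python) =====
-- from typing import Dict, List, Tuple, Any
--
-- def get_path_coords(start: Tuple[int, int], path_str: str) -> List[Tuple[int, int]]:
--     """Converts a string like 'SSEN' into a list of (x,y) coordinates."""
--     coords = [start]
--     x, y = start
--     for move in path_str:
--         if move == 'N':
--             y -= 1
--         elif move == 'S':
--             y += 1
--         elif move == 'E':
--             x += 1
--         elif move == 'W':
--             x -= 1
--         coords.append((x, y))
--     return coords
-- ===== SOURCE B (Python) =====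
-- def get_path_coords(start, path_str):
--     """Closed form per index: the i-th position is start plus the net move
--     counts (E minus W, S minus N) of the length-i prefix — no carried state."""
--     x0, y0 = start
--     return [(x0 + path_str.count('E', 0, i) - path_str.count('W', 0, i),
--              y0 + path_str.count('S', 0, i) - path_str.count('N', 0, i))
--             for i in range(len(path_str) + 1)]
-- ===== Notes on version B (the rewrite author's own statement) =====
-- stated objective: alternative
-- what changed: Replaces A's stateful fused loop by a per-index closed form: position i is start plus net directional character counts (E-W, S-N) of the length-i prefix, computed independently for every index with str.count - no running accumulator at all.
import Mathlib
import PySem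

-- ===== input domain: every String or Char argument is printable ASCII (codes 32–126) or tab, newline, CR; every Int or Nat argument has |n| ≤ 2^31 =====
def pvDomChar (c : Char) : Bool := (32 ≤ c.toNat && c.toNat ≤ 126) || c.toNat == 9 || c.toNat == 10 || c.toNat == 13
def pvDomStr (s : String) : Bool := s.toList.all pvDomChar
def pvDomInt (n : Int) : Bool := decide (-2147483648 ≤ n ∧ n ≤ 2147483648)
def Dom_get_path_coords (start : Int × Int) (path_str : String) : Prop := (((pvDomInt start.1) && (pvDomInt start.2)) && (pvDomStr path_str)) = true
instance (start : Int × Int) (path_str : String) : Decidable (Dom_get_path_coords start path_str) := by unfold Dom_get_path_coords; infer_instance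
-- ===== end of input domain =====

-- B replaces A's stateful fused loop by a per-index closed form (net prefix counts of E/W/S/N); return value only, same results.


-- ===== PORT A =====
-- the for-loop: state (x, y), appending (x, y) after each move
def pvALoop (x y : Int) : List Char → List (Int × Int)
  | [] => []
  | c :: cs =>
    let x' := if c = 'E' then x + 1 else if c = 'W' then x - 1 else x
    let y' := if c = 'N' then y - 1 else if c = 'S' then y + 1 else y
    (x', y') :: pvALoop x' y' cs

def get_path_coords (start : Int × Int) (path_str : String) : List (Int × Int) :=
  start :: pvALoop start.1 start.2 path_str.toList

-- ===== PORT B =====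
-- path_str.count(ch, 0, i) for a single ASCII char and 0 ≤ i is exactly the count of ch in the first i characters
def get_path_coords_alt (start : Int × Int) (path_str : String) : List (Int × Int) :=
  (PySem.List.pyRange 0 (path_str.toList.length + 1) 1).map (fun i =>
    let p := path_str.toList.take i.toNat
    (start.1 + (p.count 'E' : Int) - (p.count 'W' : Int),
     start.2 + (p.count 'S' : Int) - (p.count 'N' : Int)))

-- ===== PRECONDITION & SPEC =====
def Spec_get_path_coords (start : Int × Int) (path_str : String) (out : List (Int × Int)) : Prop := out = get_path_coords_alt start path_str
instance (start : Int × Int) (path_str : String) (out : List (Int × Int)) : Decidable (Spec_get_path_coords start path_str out) := by unfold Spec_get_path_coords; infer_instance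

-- ===== CLAIM =====
def Claim_equal_get_path_coords : Prop := ∀ (start : Int × Int) (path_str : String), Dom_get_path_coords start path_str → Spec_get_path_coords start path_str (get_path_coords start path_str)

-- ===== LEMMAS AND PROOFS =====
theorem pv_key (l : List Char) : ∀ (x y : Int),
    (x, y) :: pvALoop x y l =
      (List.range (l.length + 1)).map (fun k =>
        (x + ((l.take k).count 'E' : Int) - ((l.take k).count 'W' : Int),
         y + ((l.take k).count 'S' : Int) - ((l.take k).count 'N' : Int))) := by
  induction l with
  | nil => intro x y; simp [pvALoop]
  | cons c cs ih =>
    intro x y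
    have hr : List.range (cs.length + 1 + 1) =
        0 :: (List.range (cs.length + 1)).map Nat.succ := by
      simp [List.range_succ_eq_map]
    simp only [List.length_cons, hr, List.map_cons, List.map_map]
    simp only [pvALoop]
    rw [ih]
    congr 1
    · simp
    · apply List.map_congr_left
      intro k _
      simp only [Function.comp, List.take_succ_cons, List.count_cons]
      split_ifs <;> simp_all <;> push_cast <;> ring

-- ===== VERDICT =====
theorem get_path_coords_spec : Claim_equal_get_path_coords := by
  intro start path_str _
  unfold Spec_get_path_coords get_path_coords get_path_coords_alt
  rw [PySem.List.pyRange_one]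
  simp only [zero_add, List.map_map, Int.toNat_natCast, Function.comp]
  exact (pv_key path_str.toList start.1 start.2).symm ▸ rfl
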